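-- pv_equiv track=rewrite | github.com/liskos/jakov | ege05/293.py | f
-- ===== SOURCE A (Python) =====
-- def f(n):
--     p1 = 1
--     p2 = 1
--     for i in str(n):
--         if int(i) == 0:
--             continue
--         elif int(i) % 2 == 0:
--             p1 = int(i) * p1
--         else:
--             p2 = int(i) * p2
--     return p1,p2
-- ===== SOURCE B (Python) =====
-- def f(n):
--     def go(m):
--         e, o = go(m // 10) if m >= 10 else (1, 1)
--         d = m % 10
--         if d == 0:
--             return e, o
--         if d % 2 == 0:
--             return d * e, o
--         return e, d * o
--     return go(n)
-- ===== Notes on version B (the rewrite author's own statement) =====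
-- stated objective: alternative
-- what changed: B abandons the string conversion entirely: it extracts the digits arithmetically by a divmod recursion (m % 10, m // 10) and multiplies them into the two products on the way back up, where A converts n to a string and re-parses each character with int(); Pre_ excludes negative inputs, where A raises ValueError on the minus sign.
import Mathlib
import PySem

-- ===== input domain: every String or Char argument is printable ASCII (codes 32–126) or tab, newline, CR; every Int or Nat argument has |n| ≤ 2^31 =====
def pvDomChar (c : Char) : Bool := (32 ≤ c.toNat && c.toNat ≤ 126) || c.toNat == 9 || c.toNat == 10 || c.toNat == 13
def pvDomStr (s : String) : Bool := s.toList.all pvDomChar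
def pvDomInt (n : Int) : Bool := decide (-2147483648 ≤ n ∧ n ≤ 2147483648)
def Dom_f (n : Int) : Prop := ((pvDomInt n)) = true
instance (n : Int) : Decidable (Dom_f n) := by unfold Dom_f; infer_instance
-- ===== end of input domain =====

-- B replaces A's string conversion and per-character int() parsing by an arithmetic divmod
-- recursion over the digits (objective: alternative, same asymptotic cost).

-- ===== PORT A =====
-- int(i) for a one-character string; exact where Python returns (digit chars); on '-' Python raises, excluded by Pre_f
def pyIntChar (c : Char) : Int := (PySem.Int.ofChars? [c]).getD 0

def fStep (p : Int × Int) (i : Char) : Int × Int :=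
  if pyIntChar i = 0 then p
  else if PySem.Int.mod (pyIntChar i) 2 = 0 then (pyIntChar i * p.1, p.2)
  else (p.1, pyIntChar i * p.2)

def f (n : Int) : Int × Int :=
  (PySem.Int.toChars n).foldl fStep (1, 1)

-- ===== PORT B =====
-- the inner 'go' of Source B; the dite guard only makes the Python recursion total (Python recurses iff m >= 10)
def fAltGo (m : Int) : Int × Int :=
  let p := if _h : 10 ≤ m then fAltGo (PySem.Int.floordiv m 10) else (1, 1)
  let d := PySem.Int.mod m 10
  if d = 0 then p
  else if PySem.Int.mod d 2 = 0 then (d * p.1, p.2)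
  else (p.1, d * p.2)
termination_by m.toNat
decreasing_by
  have h10 : PySem.Int.floordiv m 10 = m / 10 := PySem.Int.floordiv_eq_ediv_of_pos (by norm_num)
  rw [h10]; omega

def f_alt (n : Int) : Int × Int := fAltGo n

-- ===== PRECONDITION & SPEC =====
-- Pre_f excludes negative inputs: there str(n) starts with the minus sign and int('-') raises ValueError in A.
def Pre_f (n : Int) : Prop := 0 ≤ n
instance (n : Int) : Decidable (Pre_f n) := by unfold Pre_f; infer_instance
def pvWitness_f : Int := 204683

def Spec_f (n : Int) (out : Int × Int) : Prop := out = f_alt n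
instance (n : Int) (out : Int × Int) : Decidable (Spec_f n out) := by unfold Spec_f; infer_instance

-- ===== CLAIM =====
def Claim_equal_f : Prop := ∀ (n : Int), Dom_f n → Pre_f n → Spec_f n (f n)

-- ===== LEMMAS AND PROOFS =====

lemma pyIntChar_digitChar (d : Nat) (h : d < 10) : pyIntChar (Nat.digitChar d) = (d : Int) := by
  interval_cases d <;> decide

lemma fAltGo_natCast (m : Nat) :
    fAltGo (m : Int) =
      (let p := if 10 ≤ m then fAltGo ((m / 10 : Nat) : Int) else (1, 1)
       let d : Int := ((m % 10 : Nat) : Int)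
       if d = 0 then p
       else if PySem.Int.mod d 2 = 0 then (d * p.1, p.2)
       else (p.1, d * p.2)) := by
  rw [fAltGo]
  have hfd : PySem.Int.floordiv (m : Int) ((10 : Nat) : Int) = ((m / 10 : Nat) : Int) :=
    PySem.Int.floordiv_natCast m 10
  have hmd : PySem.Int.mod (m : Int) ((10 : Nat) : Int) = ((m % 10 : Nat) : Int) :=
    PySem.Int.mod_natCast m 10
  simp only [show ((10 : Nat) : Int) = (10 : Int) by norm_num] at hfd hmd
  simp only [hfd, hmd]
  by_cases h : 10 ≤ m
  · rw [dif_pos (by exact_mod_cast h), if_pos h]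
  · rw [dif_neg (by exact_mod_cast h), if_neg h]

lemma main_loop (m : Nat) : ∀ (p1 p2 : Int),
    (Nat.toDigits 10 m).foldl fStep (p1, p2)
      = (p1 * (fAltGo (m : Int)).1, p2 * (fAltGo (m : Int)).2) := by
  induction m using Nat.strong_induction_on with
  | _ m ih =>
    intro p1 p2
    rw [fAltGo_natCast]
    by_cases hm : m < 10
    · have hnotle : ¬ 10 ≤ m := by omega
      have hmod : m % 10 = m := Nat.mod_eq_of_lt hm
      rw [Nat.toDigits_of_lt_base hm, List.foldl_cons, List.foldl_nil]
      simp only [if_neg hnotle, hmod]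
      unfold fStep
      rw [pyIntChar_digitChar m hm]
      by_cases h0 : (m : Int) = 0
      · simp [h0]
      · rw [if_neg h0, if_neg h0]
        by_cases h2 : PySem.Int.mod (m : Int) 2 = 0
        · rw [if_pos h2, if_pos h2]; exact Prod.ext (by ring) (by ring)
        · rw [if_neg h2, if_neg h2]; exact Prod.ext (by ring) (by ring)
    · have hle : 10 ≤ m := by omega
      have hdivlt : m / 10 < m := Nat.div_lt_self (by omega) (by norm_num)
      rw [Nat.toDigits_of_base_le (by norm_num) hle, List.foldl_append,
        ih (m / 10) hdivlt p1 p2, List.foldl_cons, List.foldl_nil]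
      simp only [if_pos hle]
      unfold fStep
      rw [pyIntChar_digitChar (m % 10) (Nat.mod_lt m (by norm_num))]
      by_cases h0 : ((m % 10 : Nat) : Int) = 0
      · simp [h0]
      · rw [if_neg h0, if_neg h0]
        by_cases h2 : PySem.Int.mod ((m % 10 : Nat) : Int) 2 = 0
        · rw [if_pos h2, if_pos h2]; exact Prod.ext (by ring) (by ring)
        · rw [if_neg h2, if_neg h2]; exact Prod.ext (by ring) (by ring)

-- ===== VERDICT =====
theorem f_spec : Claim_equal_f := by
  intro n _ hpre
  unfold Spec_f f f_alt
  have hn : ((n.toNat : Nat) : Int) = n := Int.toNat_of_nonneg hpre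
  have htc : PySem.Int.toChars n = Nat.toDigits 10 n.toNat := by
    unfold PySem.Int.toChars
    rw [if_neg (not_lt.mpr hpre)]
  have hml := main_loop n.toNat 1 1
  rw [hn] at hml
  rw [htc, hml, one_mul, one_mul]
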